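-- pv_equiv track=rewrite | github.com/shadow79102/Sentiment-Analysis-on-Movie-Reviews | Train/train_ngram.py | concatenate_words
-- ===== SOURCE A (Python) =====
-- def concatenate_words(index, text, ngram_words, forward):
--     words = text[index]
--     if index == len(text)-1:
--         return words, index
--     if words.split(' ')[0] in ngram_words:
--         [new_word, new_index] = concatenate_words(index+1, text, ngram_words, forward)
--         if forward:
--             words = words + ' ' + new_word
--         else:
--             words = new_word + ' ' + words
--         index = new_index
--     return words, index
-- ===== SOURCE B (Python) =====
-- def concatenate_words(index, text, ngram_words, forward):
--     collected = [text[index]]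
--     i = index
--     while i != len(text) - 1 and text[i].split(' ')[0] in ngram_words:
--         i += 1
--         collected.append(text[i])
--     if forward:
--         words = ' '.join(collected)
--     else:
--         words = ' '.join(reversed(collected))
--     return words, i
-- ===== Notes on version B (the rewrite author's own statement) =====
-- stated objective: alternative
-- what changed: Replaced A's recursion (which rebuilds the joined string at every return) by a single iterative forward scan that collects the words in a list and joins them once at the end (reversed when forward is false).
import Mathlib
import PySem

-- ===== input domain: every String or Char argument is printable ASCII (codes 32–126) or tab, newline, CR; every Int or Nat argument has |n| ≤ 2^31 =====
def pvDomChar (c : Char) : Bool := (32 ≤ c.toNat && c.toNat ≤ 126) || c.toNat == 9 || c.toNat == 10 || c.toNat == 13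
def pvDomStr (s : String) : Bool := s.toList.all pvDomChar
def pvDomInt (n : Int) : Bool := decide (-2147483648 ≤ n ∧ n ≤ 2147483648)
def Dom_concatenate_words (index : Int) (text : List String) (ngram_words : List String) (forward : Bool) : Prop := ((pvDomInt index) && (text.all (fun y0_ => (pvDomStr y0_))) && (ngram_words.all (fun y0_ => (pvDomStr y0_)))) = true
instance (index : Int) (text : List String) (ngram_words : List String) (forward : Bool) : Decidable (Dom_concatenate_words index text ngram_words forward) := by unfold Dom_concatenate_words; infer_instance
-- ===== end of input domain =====

-- B replaces A's recursion (which rebuilds the joined string at every return) by one iterative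
-- forward scan collecting the words in a list, joined once at the end; same return value on
-- every in-range index.

-- shared helper: words.split(' ')[0] (split with the nonempty separator " " always yields a
-- nonempty list, so [0] never raises and headD "" is exact)
def pvFirstWord (s : String) : String := ((PySem.Str.split? s " ").getD []).headD ""

-- cited by both ports' decreasing_by
theorem pvGetSome_lt {α : Type} {xs : List α} {i : Int} {x : α} (h : PySem.List.pyGet? xs i = some x) : i < (xs.length : Int) := by
  by_contra hc
  have : ¬ PySem.Raise.InRange xs.length i := by
    simp [PySem.Raise.InRange]; omega
  rw [← PySem.List.pyGet?_eq_none_iff] at this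
  simp [this] at h

-- ===== PORT A =====
def concatenate_words (index : Int) (text : List String) (ngram_words : List String) (forward : Bool) : String × Int :=
  match h : PySem.List.pyGet? text index with
  | none => ("", index)      -- text[index] raises IndexError in Python; excluded by Pre_
  | some words =>
    if _hl : index = (text.length : Int) - 1 then (words, index)
    else if pvFirstWord words ∈ ngram_words then
      let r := concatenate_words (index + 1) text ngram_words forward
      ((if forward then words ++ " " ++ r.1 else r.1 ++ " " ++ words), r.2)
    else (words, index)
termination_by ((text.length : Int) - 1 - index).toNat
decreasing_by
  have := pvGetSome_lt h
  omega

-- ===== PORT B =====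
-- the while loop of Source B, state (collected, i)
def pvLoop (text : List String) (ngram_words : List String) (i : Int) (collected : List String) : List String × Int :=
  match h : PySem.List.pyGet? text i with
  | none => (collected, i)   -- unreachable under Pre_: i stays in range
  | some w =>
    if _hl : i = (text.length : Int) - 1 then (collected, i)
    else if pvFirstWord w ∈ ngram_words then
      match PySem.List.pyGet? text (i + 1) with
      | none => (collected, i)   -- unreachable: i + 1 is in range here
      | some w' => pvLoop text ngram_words (i + 1) (collected ++ [w'])
    else (collected, i)
termination_by ((text.length : Int) - 1 - i).toNat
decreasing_by
  have := pvGetSome_lt h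
  omega

def concatenate_words_alt (index : Int) (text : List String) (ngram_words : List String) (forward : Bool) : String × Int :=
  match PySem.List.pyGet? text index with
  | none => ("", index)      -- text[index] raises IndexError in Python; excluded by Pre_
  | some w0 =>
    let p := pvLoop text ngram_words index [w0]
    ((if forward then PySem.Str.join " " p.1 else PySem.Str.join " " p.1.reverse), p.2)

-- ===== PRECONDITION & SPEC =====
-- Pre_: exactly the in-range indices (-len ≤ index < len); outside them Python's very first
-- text[index] raises IndexError in both A and B, so A returns on precisely these inputs.
def Pre_concatenate_words (index : Int) (text : List String) (ngram_words : List String) (forward : Bool) : Prop :=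
  PySem.Raise.InRange text.length index
instance (index : Int) (text : List String) (ngram_words : List String) (forward : Bool) : Decidable (Pre_concatenate_words index text ngram_words forward) := by unfold Pre_concatenate_words; infer_instance

def pvWitness_concatenate_words : Int × List String × List String × Bool := (0, ["ng a", "b c"], ["ng"], false)

def Spec_concatenate_words (index : Int) (text : List String) (ngram_words : List String) (forward : Bool) (out : String × Int) : Prop := out = concatenate_words_alt index text ngram_words forward
instance (index : Int) (text : List String) (ngram_words : List String) (forward : Bool) (out : String × Int) : Decidable (Spec_concatenate_words index text ngram_words forward out) := by unfold Spec_concatenate_words; infer_instance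

-- ===== CLAIM (what is proved, stated in full; the proofs are below) =====
def Claim_equal_concatenate_words : Prop := ∀ (index : Int) (text : List String) (ngram_words : List String) (forward : Bool), Dom_concatenate_words index text ngram_words forward → Pre_concatenate_words index text ngram_words forward → Spec_concatenate_words index text ngram_words forward (concatenate_words index text ngram_words forward)

-- ===== LEMMAS AND PROOFS =====

-- join over a snoc of a nonempty list, at the List Char level
theorem pvCharsJoin_snoc (sep : List Char) (L : List (List Char)) (w : List Char) (h : L ≠ []) :
    PySem.Chars.join sep (L ++ [w]) = PySem.Chars.join sep L ++ sep ++ w := by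
  induction L with
  | nil => exact absurd rfl h
  | cons a rest ih =>
    cases rest with
    | nil => simp [PySem.Chars.join_cons_cons, PySem.Chars.join_singleton]
    | cons b r =>
      have := ih (by simp)
      simp only [List.cons_append, PySem.Chars.join_cons_cons]
      rw [← List.cons_append, this]
      simp [List.append_assoc]

theorem pvJoin_single (w : String) : PySem.Str.join " " [w] = w := by
  apply String.ext
  simp [PySem.Str.toList_join, PySem.Chars.join_singleton]

theorem pvJoin_cons (w : String) (L : List String) (h : L ≠ []) :
    PySem.Str.join " " (w :: L) = w ++ " " ++ PySem.Str.join " " L := by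
  cases L with
  | nil => exact absurd rfl h
  | cons b r =>
    apply String.ext
    simp [PySem.Str.toList_join, PySem.Chars.join_cons_cons]

theorem pvJoin_snoc (L : List String) (w : String) (h : L ≠ []) :
    PySem.Str.join " " (L ++ [w]) = PySem.Str.join " " L ++ " " ++ w := by
  apply String.ext
  have h2 : L.map String.toList ≠ [] := by simpa using h
  simp [PySem.Str.toList_join, pvCharsJoin_snoc [' '] (L.map String.toList) w.toList h2, List.append_assoc]

-- the loop's accumulator is a prefix of its result
theorem pvLoop_acc (text ngram_words : List String) : ∀ (n : Nat) (i : Int) (acc1 acc2 : List String),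
    ((text.length : Int) - 1 - i).toNat ≤ n →
    pvLoop text ngram_words i (acc1 ++ acc2) =
      (acc1 ++ (pvLoop text ngram_words i acc2).1, (pvLoop text ngram_words i acc2).2) := by
  intro n
  induction n with
  | zero =>
    intro i acc1 acc2 hn
    rw [pvLoop, pvLoop]
    cases hg : PySem.List.pyGet? text i with
    | none => simp
    | some w =>
      have := pvGetSome_lt hg
      have hi : i = (text.length : Int) - 1 := by omega
      simp [hi]
  | succ n ih =>
    intro i acc1 acc2 hn
    rw [pvLoop]
    conv_rhs => rw [pvLoop]
    cases hg : PySem.List.pyGet? text i with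
    | none => simp
    | some w =>
      simp only []
      by_cases hi : i = (text.length : Int) - 1
      · simp [hi]
      · simp only [dif_neg hi]
        by_cases hm : pvFirstWord w ∈ ngram_words
        · simp only [if_pos hm]
          cases hg2 : PySem.List.pyGet? text (i + 1) with
          | none => simp
          | some w' =>
            have hlt := pvGetSome_lt hg
            have : ((text.length : Int) - 1 - (i + 1)).toNat ≤ n := by omega
            have := ih (i + 1) acc1 (acc2 ++ [w']) this
            simp only [← List.append_assoc] at this ⊢
            exact this
        · simp [if_neg hm]

theorem pvLoop_nonempty (text ngram_words : List String) (i : Int) (w : String) :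
    ∃ tail, (pvLoop text ngram_words i [w]).1 = w :: tail := by
  have := pvLoop_acc text ngram_words (((text.length : Int) - 1 - i).toNat) i [w] [] (le_refl _)
  simp only [List.append_nil] at this
  exact ⟨(pvLoop text ngram_words i []).1, by simp [this]⟩

-- one unfolding of pvLoop when the current index is in range
theorem pvLoop_eq_some {text ngram_words : List String} {i : Int} {w : String} {acc : List String}
    (h : PySem.List.pyGet? text i = some w) :
    pvLoop text ngram_words i acc =
      if i = (text.length : Int) - 1 then (acc, i)
      else if pvFirstWord w ∈ ngram_words then
        (match PySem.List.pyGet? text (i + 1) with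
         | none => (acc, i)
         | some w' => pvLoop text ngram_words (i + 1) (acc ++ [w']))
      else (acc, i) := by
  rw [pvLoop]
  split
  · rename_i heq; rw [heq] at h; cases h
  · rename_i w2 heq; rw [heq] at h; injection h with hw; subst hw
    by_cases hi : i = (text.length : Int) - 1 <;> simp [hi]

-- one unfolding of A's recursion when the current index is in range
theorem pvA_eq_some {text ngram_words : List String} {forward : Bool} {i : Int} {w : String}
    (h : PySem.List.pyGet? text i = some w) :
    concatenate_words i text ngram_words forward =
      if i = (text.length : Int) - 1 then (w, i)
      else if pvFirstWord w ∈ ngram_words then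
        ((if forward then w ++ " " ++ (concatenate_words (i + 1) text ngram_words forward).1
          else (concatenate_words (i + 1) text ngram_words forward).1 ++ " " ++ w),
         (concatenate_words (i + 1) text ngram_words forward).2)
      else (w, i) := by
  rw [concatenate_words]
  split
  · rename_i heq; rw [heq] at h; cases h
  · rename_i w2 heq; rw [heq] at h; injection h with hw; subst hw
    by_cases hi : i = (text.length : Int) - 1 <;> simp [hi]

-- main invariant: A's recursion computes B's joined loop result
theorem pvMain (text ngram_words : List String) (forward : Bool) : ∀ (n : Nat) (i : Int) (w : String),
    ((text.length : Int) - 1 - i).toNat ≤ n →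
    PySem.List.pyGet? text i = some w →
    concatenate_words i text ngram_words forward =
      ((if forward then PySem.Str.join " " (pvLoop text ngram_words i [w]).1
        else PySem.Str.join " " (pvLoop text ngram_words i [w]).1.reverse),
       (pvLoop text ngram_words i [w]).2) := by
  intro n
  induction n with
  | zero =>
    intro i w hn h
    have := pvGetSome_lt h
    have hi : i = (text.length : Int) - 1 := by omega
    rw [pvA_eq_some h, pvLoop_eq_some h]
    simp [hi, pvJoin_single]
  | succ n ih =>
    intro i w hn h
    rw [pvA_eq_some h, pvLoop_eq_some h]
    by_cases hi : i = (text.length : Int) - 1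
    · simp [hi, pvJoin_single]
    · simp only [if_neg hi]
      by_cases hm : pvFirstWord w ∈ ngram_words
      · simp only [if_pos hm]
        have hlt := pvGetSome_lt h
        have hin : PySem.Raise.InRange text.length i := by
          by_contra hc
          rw [← PySem.List.pyGet?_eq_none_iff] at hc
          simp [hc] at h
        have hin2 : PySem.Raise.InRange text.length (i + 1) := by
          simp [PySem.Raise.InRange] at hin ⊢
          omega
        obtain ⟨w', hw'⟩ : ∃ w', PySem.List.pyGet? text (i + 1) = some w' := by
          cases hg2 : PySem.List.pyGet? text (i + 1) with
          | none => rw [PySem.List.pyGet?_eq_none_iff] at hg2; exact absurd hin2 hg2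
          | some w' => exact ⟨w', rfl⟩
        rw [hw']
        dsimp only
        have hmeas : ((text.length : Int) - 1 - (i + 1)).toNat ≤ n := by omega
        rw [ih (i + 1) w' hmeas hw']
        have hacc : pvLoop text ngram_words (i + 1) ([w] ++ [w']) =
            ([w] ++ (pvLoop text ngram_words (i + 1) [w']).1, (pvLoop text ngram_words (i + 1) [w']).2) :=
          pvLoop_acc text ngram_words (((text.length : Int) - 1 - (i + 1)).toNat) (i + 1) [w] [w'] (le_refl _)
        obtain ⟨tail, htail⟩ := pvLoop_nonempty text ngram_words (i + 1) w'
        cases forward with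
        | true =>
          rw [hacc, htail]
          simp [pvJoin_cons w (w' :: tail) (by simp)]
        | false =>
          rw [hacc, htail]
          simp only [List.singleton_append, List.reverse_cons, Bool.false_eq_true, if_false]
          have e : tail.reverse ++ [w', w] = (tail.reverse ++ [w']) ++ [w] := by simp
          rw [List.append_assoc, List.singleton_append, e, pvJoin_snoc (tail.reverse ++ [w']) w (by simp)]
      · simp [if_neg hm, pvJoin_single]

-- ===== VERDICT (by name: the statement is the Claim_ definition above) =====
theorem concatenate_words_spec : Claim_equal_concatenate_words := by
  intro index text ngram_words forward _ hpre
  unfold Spec_concatenate_words concatenate_words_alt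
  obtain ⟨w, hw⟩ : ∃ w, PySem.List.pyGet? text index = some w := by
    cases hg : PySem.List.pyGet? text index with
    | none => rw [PySem.List.pyGet?_eq_none_iff] at hg; exact absurd hpre hg
    | some w => exact ⟨w, rfl⟩
  rw [hw]
  exact pvMain text ngram_words forward (((text.length : Int) - 1 - index).toNat) index w (le_refl _) hw
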